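-- pv_equiv track=rewrite | github.com/yserjjj-2022/curious-bot | services/text_utils.py | cleanup_summary_text
-- ===== SOURCE A (Python) =====
-- def cleanup_summary_text(text: str) -> str:
--     """
--     Безопасная очистка для текста, полученного от GigaChat.
--     Удаляет ТОЛЬКО Markdown, не трогая другие символы.
--     """
--     if not text:
--         return ""
--
--     # 1. Механически удаляем жирный шрифт
--     clean_text = text.replace('**', '')
--
--     # 2. Механически удаляем строки, похожие на заголовки или разделители
--     lines = clean_text.splitlines()
--     cleaned_lines = []
--     for line in lines:
--         stripped_line = line.strip()
--         if stripped_line.startswith(('#', '---')):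
--             continue
--         cleaned_lines.append(line)
--     clean_text = "\n".join(cleaned_lines)
--
--     # 3. Финальная очистка пустых строк
--     lines = (line.strip() for line in clean_text.splitlines())
--     return "\n".join(line for line in lines if line)
-- ===== SOURCE B (Python) =====
-- BREAKS = '\n\r\x0b\x0c\x1c\x1d\x1e\x85\u2028\u2029'
--
--
-- def _flush(cur, out):
--     s = ''.join(cur).strip()
--     if s and not s.startswith(('#', '---')):
--         out.append(s)
--
--
-- def cleanup_summary_text(text: str) -> str:
--     # Character-level state machine: a single scan over the raw text that skips
--     # '**' pairs, splits on line breaks and keeps only stripped non-empty,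
--     # non-header lines -- no str.replace, no splitlines, no staged passes.
--     if not text:
--         return ""
--     out = []
--     cur = []
--     i, n = 0, len(text)
--     while i < n:
--         c = text[i]
--         if c == '\r' and i + 1 < n and text[i + 1] == '\n':
--             _flush(cur, out)
--             cur = []
--             i += 2
--         elif c == '*' and i + 1 < n and text[i + 1] == '*':
--             i += 2
--         elif c in BREAKS:
--             _flush(cur, out)
--             cur = []
--             i += 1
--         else:
--             cur.append(c)
--             i += 1
--     _flush(cur, out)
--     return "\n".join(out)
-- ===== Notes on version B (the rewrite author's own statement) =====
-- stated objective: alternative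
-- what changed: A's staged pipeline (global '**' replace, splitlines, header-filter pass, join, re-splitlines, empty-line pass) is replaced by a single character-level state machine that scans the raw text once, skipping '**' pairs and emitting stripped non-empty non-header lines as it meets line breaks.
import Mathlib
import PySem

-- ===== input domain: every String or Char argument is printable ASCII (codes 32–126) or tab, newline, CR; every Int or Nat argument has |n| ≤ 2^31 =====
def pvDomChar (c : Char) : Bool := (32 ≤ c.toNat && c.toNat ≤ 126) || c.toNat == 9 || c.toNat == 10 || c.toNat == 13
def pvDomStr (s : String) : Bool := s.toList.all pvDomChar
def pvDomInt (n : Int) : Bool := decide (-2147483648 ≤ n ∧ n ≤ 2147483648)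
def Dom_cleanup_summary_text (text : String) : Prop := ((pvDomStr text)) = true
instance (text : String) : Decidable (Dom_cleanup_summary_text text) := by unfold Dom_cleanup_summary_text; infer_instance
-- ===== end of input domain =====

-- B replaces A's staged pipeline (global '**' replace, splitlines, header-filter pass,
-- join, re-splitlines, empty-line pass) by a single character-level state machine over
-- the raw text; objective: alternative (same asymptotic cost, one scan).

-- shared helper: Python's s.startswith(('#', '---'))
def pvIsHeader (s : List Char) : Bool :=
  PySem.Chars.startswith s ['#'] || PySem.Chars.startswith s ['-', '-', '-']

def pvAltBreak (c : Char) : Bool :=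
  c = '\n' || c = '\r' || c = '\x0b' || c = '\x0c' ||
  c = '\x1c' || c = '\x1d' || c = '\x1e' || c = '\x85' ||
  c = '\u2028' || c = '\u2029'

def pvAltFlush (cur : List Char) (out : List (List Char)) : List (List Char) :=
  let s := PySem.Chars.strip cur
  if !s.isEmpty && !pvIsHeader s then out ++ [s] else out

def pvAltGo : List Char → List Char → List (List Char) → List (List Char)
  | [], cur, out => pvAltFlush cur out
  | '\r' :: '\n' :: rest, cur, out => pvAltGo rest [] (pvAltFlush cur out)
  | '*' :: '*' :: rest, cur, out => pvAltGo rest cur out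
  | c :: rest, cur, out =>
      if pvAltBreak c then pvAltGo rest [] (pvAltFlush cur out)
      else pvAltGo rest (cur ++ [c]) out

-- ===== PORT A =====
def cleanup_summary_text (text : String) : String :=
  if text.toList = [] then ""
  else
    let cleanText := PySem.Chars.replace text.toList ['*', '*'] []
    let lines := PySem.Chars.splitlines cleanText
    let cleanedLines := lines.foldl (fun acc line =>
      if pvIsHeader (PySem.Chars.strip line) then acc else acc ++ [line]) []
    let cleanText2 := PySem.Chars.join ['\n'] cleanedLines
    let lines2 := (PySem.Chars.splitlines cleanText2).map PySem.Chars.strip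
    String.ofList (PySem.Chars.join ['\n'] (lines2.filter (fun l => !l.isEmpty)))

-- ===== PORT B =====
def cleanup_summary_text_alt (text : String) : String :=
  if text.toList = [] then ""
  else String.ofList (PySem.Chars.join ['\n'] (pvAltGo text.toList [] []))

-- ===== PRECONDITION & SPEC =====
def Spec_cleanup_summary_text (text : String) (out : String) : Prop := out = cleanup_summary_text_alt text
instance (text : String) (out : String) : Decidable (Spec_cleanup_summary_text text out) := by unfold Spec_cleanup_summary_text; infer_instance

-- ===== CLAIM (what is proved, stated in full; the proofs are below) =====
def Claim_equal_cleanup_summary_text : Prop := ∀ (text : String), Dom_cleanup_summary_text text → Spec_cleanup_summary_text text (cleanup_summary_text text)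

-- ===== LEMMAS AND PROOFS =====

def pvIsB (c : Char) : Bool :=
  decide (c.toNat = 10) || decide (c.toNat = 13) || decide (c.toNat = 11) || decide (c.toNat = 12) ||
  decide (c.toNat = 28) || decide (c.toNat = 29) || decide (c.toNat = 30) || decide (c.toNat = 133) ||
  decide (c.toNat = 8232) || decide (c.toNat = 8233)

theorem pv_char_eq_toNat (c d : Char) : (decide (c = d)) = decide (c.toNat = d.toNat) := by
  apply decide_eq_decide.mpr
  constructor
  · intro h; subst h; rfl
  · intro h; simpa using congrArg Char.ofNat h

theorem pv_break_eq (c : Char) : pvAltBreak c = pvIsB c := by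
  simp only [pvAltBreak, pvIsB, pv_char_eq_toNat]
  rfl

theorem pv_altgo_nil (cur : List Char) (out : List (List Char)) :
    pvAltGo [] cur out = pvAltFlush cur out := rfl

theorem pv_altgo_rn (rest cur : List Char) (out : List (List Char)) :
    pvAltGo ('\r' :: '\n' :: rest) cur out = pvAltGo rest [] (pvAltFlush cur out) := rfl

theorem pv_altgo_ss (rest cur : List Char) (out : List (List Char)) :
    pvAltGo ('*' :: '*' :: rest) cur out = pvAltGo rest cur out := rfl

theorem pv_altgo_cons (c : Char) (rest cur : List Char) (out : List (List Char))
    (h1 : ∀ r', c = '\r' → rest = '\n' :: r' → False)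
    (h2 : ∀ r', c = '*' → rest = '*' :: r' → False) :
    pvAltGo (c :: rest) cur out =
      if pvAltBreak c then pvAltGo rest [] (pvAltFlush cur out)
      else pvAltGo rest (cur ++ [c]) out := by
  rw [pvAltGo.eq_def]
  split
  · rename_i h; exact absurd h (by simp)
  · rename_i r h; injection h with e1 e2; exact (h1 r e1 e2).elim
  · rename_i r h; injection h with e1 e2; exact (h2 r e1 e2).elim
  · rename_i c' r hp1 hp2 h; injection h with e1 e2; subst e1; subst e2; rfl

def pvRepl : List Char → List Char
  | '*' :: '*' :: rest => pvRepl rest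
  | c :: rest => c :: pvRepl rest
  | [] => []

theorem pv_repl_cons (c : Char) (rest : List Char)
    (hne : ∀ rest', c = '*' → rest = '*' :: rest' → False) :
    pvRepl (c :: rest) = c :: pvRepl rest := by
  rw [pvRepl.eq_def]
  split
  · rename_i r heq; injection heq with h1 h2; exact (hne r h1 h2).elim
  · rename_i c' r hpat heq; injection heq with h1 h2; subst h1; subst h2; rfl
  · rename_i heq; exact absurd heq (by simp)

theorem pv_rgo_cons (n : Nat) (c : Char) (t acc : List Char) :
    PySem.Chars.replace.go ['*', '*'] [] (n + 1) (c :: t) acc =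
      if List.isPrefixOf ['*', '*'] (c :: t)
      then PySem.Chars.replace.go ['*', '*'] [] n (List.drop 2 (c :: t)) acc
      else PySem.Chars.replace.go ['*', '*'] [] n t (c :: acc) := rfl

theorem pv_replace_go_eq :
    ∀ (fuel : Nat) (l : List Char), l.length ≤ fuel → ∀ (acc : List Char),
      PySem.Chars.replace.go ['*', '*'] [] fuel l acc = acc.reverse ++ pvRepl l := by
  intro fuel
  induction fuel with
  | zero =>
      intro l hl acc
      have : l = [] := List.eq_nil_of_length_eq_zero (Nat.le_zero.mp hl)
      subst this
      rw [PySem.Chars.replace.go.eq_def]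
      simp [pvRepl]
  | succ n ih =>
      intro l hl acc
      match l with
      | [] => rw [PySem.Chars.replace.go.eq_def]; simp [pvRepl]
      | c :: t =>
          rw [pv_rgo_cons]
          by_cases hp : List.isPrefixOf ['*', '*'] (c :: t)
          · rw [if_pos hp]
            obtain ⟨d, t', rfl⟩ : ∃ d t', t = d :: t' := by
              cases t with
              | nil => simp [List.isPrefixOf] at hp
              | cons d t' => exact ⟨d, t', rfl⟩
            have hcd : '*' = c ∧ '*' = d := by simpa [List.isPrefixOf] using hp
            obtain ⟨hc, hd⟩ := hcd
            subst hc; subst hd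
            rw [show List.drop 2 ('*' :: '*' :: t') = t' from rfl,
              ih t' (by simp at hl; omega) acc,
              show pvRepl ('*' :: '*' :: t') = pvRepl t' from rfl]
          · rw [if_neg hp, ih t (by simpa using hl) (c :: acc)]
            have hne : ∀ rest', c = '*' → t = '*' :: rest' → False := by
              intro r h1 h2; subst h1; subst h2
              simp [List.isPrefixOf] at hp
            rw [pv_repl_cons c t hne]
            simp

theorem pv_replace_eq (s : List Char) :
    PySem.Chars.replace s ['*', '*'] [] = pvRepl s := by
  rw [PySem.Chars.replace, if_neg (by simp)]
  exact pv_replace_go_eq s.length s le_rfl []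

theorem pv_splitlines_eq (s : List Char) :
    PySem.Chars.splitlines s = PySem.Chars.splitlines.go pvIsB s [] [] := rfl

theorem pv_go_nil (isB : Char → Bool) (cur : List Char) (acc : List (List Char)) :
    PySem.Chars.splitlines.go isB [] cur acc =
      if cur.isEmpty then acc.reverse else (cur.reverse :: acc).reverse := rfl

theorem pv_go_rn (isB : Char → Bool) (rest cur : List Char) (acc : List (List Char)) :
    PySem.Chars.splitlines.go isB ('\r' :: '\n' :: rest) cur acc =
      PySem.Chars.splitlines.go isB rest [] (cur.reverse :: acc) := rfl

theorem pv_go_cons (isB : Char → Bool) (c : Char) (rest cur : List Char) (acc : List (List Char))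
    (hne : ∀ rest', c = '\r' → rest = '\n' :: rest' → False) :
    PySem.Chars.splitlines.go isB (c :: rest) cur acc =
      if isB c then PySem.Chars.splitlines.go isB rest [] (cur.reverse :: acc)
      else PySem.Chars.splitlines.go isB rest (c :: cur) acc := by
  rw [PySem.Chars.splitlines.go.eq_def]
  split
  · rename_i h; exact absurd h (by simp)
  · rename_i r h; injection h with h1 h2
    exact (hne r h1 h2).elim
  · rename_i c' r hpat heq; injection heq with h1 h2; subst h1; subst h2; rfl

theorem pv_go_acc_aux (isB : Char → Bool) :
    ∀ (n : Nat) (s : List Char), s.length ≤ n → ∀ (cur : List Char) (acc : List (List Char)),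
      PySem.Chars.splitlines.go isB s cur acc =
        acc.reverse ++ PySem.Chars.splitlines.go isB s cur [] := by
  intro n
  induction n with
  | zero =>
      intro s hs cur acc
      have : s = [] := List.eq_nil_of_length_eq_zero (Nat.le_zero.mp hs)
      subst this
      rw [pv_go_nil, pv_go_nil]
      by_cases h : cur.isEmpty <;> simp [h]
  | succ n ih =>
      intro s hs cur acc
      match s with
      | [] =>
          rw [pv_go_nil, pv_go_nil]
          by_cases h : cur.isEmpty <;> simp [h]
      | '\r' :: '\n' :: rest =>
          rw [pv_go_rn, pv_go_rn,
            ih rest (by simp at hs; omega) [] (cur.reverse :: acc),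
            ih rest (by simp at hs; omega) [] [cur.reverse]]
          simp
      | c :: rest =>
          by_cases hpair : c = '\r' ∧ ∃ r', rest = '\n' :: r'
          · obtain ⟨hc, r', hr⟩ := hpair
            subst hc; subst hr
            rw [pv_go_rn, pv_go_rn,
              ih r' (by simp at hs; omega) [] (cur.reverse :: acc),
              ih r' (by simp at hs; omega) [] [cur.reverse]]
            simp
          · have hne : ∀ rest', c = '\r' → rest = '\n' :: rest' → False := by
              intro r' h1 h2; exact hpair ⟨h1, ⟨r', h2⟩⟩
            rw [pv_go_cons isB c rest cur acc hne, pv_go_cons isB c rest cur [] hne]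
            by_cases hb : isB c
            · rw [if_pos hb, if_pos hb,
                ih rest (by simpa using hs) [] (cur.reverse :: acc),
                ih rest (by simpa using hs) [] [cur.reverse]]
              simp
            · rw [if_neg hb, if_neg hb,
                ih rest (by simpa using hs) (c :: cur) acc]

theorem pv_go_acc (isB : Char → Bool) (s cur : List Char) (acc : List (List Char)) :
    PySem.Chars.splitlines.go isB s cur acc =
      acc.reverse ++ PySem.Chars.splitlines.go isB s cur [] :=
  pv_go_acc_aux isB s.length s le_rfl cur acc

def pvK (ls : List (List Char)) : List (List Char) :=
  (ls.filter (fun l => !(PySem.Chars.strip l).isEmpty && !pvIsHeader (PySem.Chars.strip l))).map PySem.Chars.strip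

theorem pvK_nil : pvK [] = [] := rfl

theorem pvK_cons (l : List Char) (ls : List (List Char)) :
    pvK (l :: ls) = pvK [l] ++ pvK ls := by
  simp only [pvK, List.filter_cons]
  split <;> simp

theorem pvK_empty_cons (ls : List (List Char)) : pvK ([] :: ls) = pvK ls := by
  rw [pvK_cons]
  rfl

theorem pv_flush_eq (cur : List Char) (out : List (List Char)) :
    pvAltFlush cur out = out ++ pvK [cur] := by
  rw [pvAltFlush, pvK]
  simp only [List.filter_cons, List.filter_nil]
  split <;> simp_all

theorem pv_alt_inv :
    ∀ (s cur : List Char) (out : List (List Char)),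
      pvAltGo s cur out =
        out ++ pvK (PySem.Chars.splitlines.go pvIsB (pvRepl s) cur.reverse []) := by
  intro s cur out
  induction s, cur, out using pvAltGo.induct with
  | case1 cur out =>
      rw [pv_altgo_nil, pv_flush_eq, show pvRepl [] = [] from rfl, pv_go_nil]
      by_cases h : cur = []
      · subst h; simp [pvK_nil, pvK_empty_cons]
      · rw [if_neg (by simpa using h)]
        simp
  | case2 rest cur out ih =>
      simp only [List.reverse_nil] at ih
      rw [pv_altgo_rn, ih, pv_flush_eq]
      have h1 : pvRepl ('\r' :: '\n' :: rest) = '\r' :: '\n' :: pvRepl rest := by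
        rw [pv_repl_cons '\r' ('\n' :: rest) (by intro r h _; exact absurd h (by decide)),
          pv_repl_cons '\n' rest (by intro r h _; exact absurd h (by decide))]
      rw [h1, pv_go_rn, pv_go_acc pvIsB (pvRepl rest) [] [cur.reverse.reverse]]
      simp only [List.reverse_reverse, List.reverse_cons, List.reverse_nil, List.nil_append]
      simp [List.append_assoc]
      exact (pvK_cons cur _).symm
  | case3 rest cur out ih =>
      rw [pv_altgo_ss, ih, show pvRepl ('*' :: '*' :: rest) = pvRepl rest from rfl]
  | case4 c rest cur out h1 h2 hb ih =>
      simp only [List.reverse_nil] at ih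
      rw [pv_altgo_cons c rest cur out h1 h2, if_pos hb, ih, pv_flush_eq]
      have hb' : pvIsB c = true := by rw [← pv_break_eq]; exact hb
      rw [pv_repl_cons c rest h2]
      by_cases hcr : c = '\r'
      · subst hcr
        rcases hmr : pvRepl rest with _ | ⟨d, v⟩
        · rw [pv_go_cons pvIsB '\r' [] cur.reverse [] (by intro r _ h; cases h),
            if_pos hb', pv_go_nil, pv_go_nil]
          simp only [List.isEmpty_nil, if_true, List.reverse_cons, List.reverse_nil,
            List.nil_append, List.reverse_reverse]
          simp [pvK_nil]
        · by_cases hd : d = '\n'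
          · subst hd
            rw [pv_go_rn, pv_go_acc pvIsB v [] [cur.reverse.reverse],
              pv_go_cons pvIsB '\n' v [] [] (by intro r h _; exact absurd h (by decide)),
              if_pos (by decide),
              pv_go_acc pvIsB v [] [List.reverse []]]
            simp only [List.reverse_reverse, List.reverse_cons, List.reverse_nil,
              List.nil_append]
            simp [List.append_assoc]
            rw [pvK_empty_cons]
            exact (pvK_cons cur _).symm
          · rw [pv_go_cons pvIsB '\r' (d :: v) cur.reverse []
                (by intro r _ h; injection h with e _; exact hd e), if_pos hb',
              pv_go_acc pvIsB (d :: v) [] [cur.reverse.reverse]]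
            simp only [List.reverse_reverse, List.reverse_cons, List.reverse_nil,
              List.nil_append]
            simp [List.append_assoc]
            exact (pvK_cons cur _).symm
      · rw [pv_go_cons pvIsB c (pvRepl rest) cur.reverse [] (by intro r h _; exact hcr h),
          if_pos hb', pv_go_acc pvIsB (pvRepl rest) [] [cur.reverse.reverse]]
        simp only [List.reverse_reverse, List.reverse_cons, List.reverse_nil, List.nil_append]
        simp [List.append_assoc]
        exact (pvK_cons cur _).symm
  | case5 c rest cur out h1 h2 hb ih =>
      rw [pv_altgo_cons c rest cur out h1 h2, if_neg hb, ih, pv_repl_cons c rest h2]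
      have hb' : pvIsB c = false := by rw [← pv_break_eq]; exact Bool.eq_false_iff.mpr hb
      have hcr : c ≠ '\r' := by intro h; subst h; exact hb (by decide)
      rw [pv_go_cons pvIsB c (pvRepl rest) cur.reverse [] (by intro r h _; exact hcr h),
        if_neg (by simp [hb'])]
      simp

theorem pv_go_skip (isB : Char → Bool) (hr : isB '\r' = true) (cs s' cur : List Char)
    (acc : List (List Char)) (h : ∀ c ∈ cs, isB c = false) :
    PySem.Chars.splitlines.go isB (cs ++ s') cur acc =
      PySem.Chars.splitlines.go isB s' (cs.reverse ++ cur) acc := by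
  induction cs generalizing cur with
  | nil => simp
  | cons c cs ih =>
      have hc : isB c = false := h c (by simp)
      have hcr : c ≠ '\r' := fun hh => by rw [hh] at hc; rw [hr] at hc; cases hc
      rw [List.cons_append, pv_go_cons isB c _ cur acc (fun r h1 _ => hcr h1), if_neg (by simp [hc]),
        ih (c :: cur) (fun d hd => h d (by simp [hd]))]
      simp

def pvDropT : List (List Char) → List (List Char)
  | [] => []
  | [l] => if l.isEmpty then [] else [l]
  | l :: l' :: ls => l :: pvDropT (l' :: ls)

theorem pv_go_join (isB : Char → Bool) (hn : isB '\n' = true) (hr : isB '\r' = true)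
    (ls : List (List Char)) (acc : List (List Char))
    (h : ∀ l ∈ ls, ∀ c ∈ l, isB c = false) :
    PySem.Chars.splitlines.go isB (PySem.Chars.join ['\n'] ls) [] acc =
      acc.reverse ++ pvDropT ls := by
  induction ls generalizing acc with
  | nil => simp [PySem.Chars.join, List.intercalate, pv_go_nil, pvDropT]
  | cons l ls ih =>
      cases ls with
      | nil =>
          have hjoin : PySem.Chars.join ['\n'] [l] = l := by
            simp [PySem.Chars.join, List.intercalate]
          rw [hjoin, show l = l ++ [] from by simp,
            pv_go_skip isB hr l [] [] acc (fun c hc => h l (by simp) c (by simpa using hc)),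
            pv_go_nil]
          by_cases hl : l.isEmpty
          · have : l = [] := List.isEmpty_iff.mp hl
            subst this; simp [pvDropT]
          · simp [pvDropT, hl]
      | cons l' ls' =>
          have hjoin : PySem.Chars.join ['\n'] (l :: l' :: ls') =
              l ++ '\n' :: PySem.Chars.join ['\n'] (l' :: ls') := by
            simp [PySem.Chars.join, List.intercalate, List.intersperse]
          rw [hjoin, pv_go_skip isB hr l _ [] acc (fun c hc => h l (by simp) c hc),
            pv_go_cons isB '\n' _ _ _ (by intro r h1 _; exact absurd h1 (by decide)), if_pos hn,
            ih _ (fun m hm => h m (List.mem_cons_of_mem _ hm))]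
          simp [pvDropT]

theorem pv_go_break_free (isB : Char → Bool) (s cur : List Char) (acc : List (List Char))
    (hcur : ∀ c ∈ cur, isB c = false) (hacc : ∀ l ∈ acc, ∀ c ∈ l, isB c = false) :
    ∀ l ∈ PySem.Chars.splitlines.go isB s cur acc, ∀ c ∈ l, isB c = false := by
  induction s, cur, acc using PySem.Chars.splitlines.go.induct (isB := isB) with
  | case1 cur acc h =>
      rw [pv_go_nil, if_pos h]
      simpa using hacc
  | case2 cur acc h =>
      rw [pv_go_nil, if_neg h]
      intro l hl c hc
      rcases (by simpa [List.mem_reverse] using hl : l ∈ acc ∨ l = cur.reverse) with h' | h'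
      · exact hacc l h' c hc
      · exact hcur c (by simpa [h', List.mem_reverse] using hc)
  | case3 rest cur acc ih =>
      rw [PySem.Chars.splitlines.go.eq_def]
      exact ih (by simp) (by
        intro l hl c hc
        rcases List.mem_cons.mp hl with h' | h'
        · exact hcur c (by simpa [h', List.mem_reverse] using hc)
        · exact hacc l h' c hc)
  | case4 c rest cur acc hne hb ih =>
      rw [pv_go_cons isB c rest cur acc hne, if_pos hb]
      exact ih (by simp) (by
        intro l hl d hd
        rcases List.mem_cons.mp hl with h' | h'
        · exact hcur d (by simpa [h', List.mem_reverse] using hd)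
        · exact hacc l h' d hd)
  | case5 c rest cur acc hne hb ih =>
      rw [pv_go_cons isB c rest cur acc hne, if_neg (by simpa using hb)]
      exact ih (by
        intro d hd
        rcases List.mem_cons.mp hd with h' | h'
        · subst h'; simpa using hb
        · exact hcur d h') hacc

theorem pv_filter_strip_dropT (ls : List (List Char)) :
    ((pvDropT ls).map PySem.Chars.strip).filter (fun l => !l.isEmpty)
      = (ls.map PySem.Chars.strip).filter (fun l => !l.isEmpty) := by
  induction ls using pvDropT.induct with
  | case1 => rfl
  | case2 l hl =>
      have : l = [] := List.isEmpty_iff.mp hl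
      subst this; simp [pvDropT]; rfl
  | case3 l hl => simp [pvDropT, hl]
  | case4 l l' ls ih =>
      simp only [pvDropT, List.map_cons, List.filter_cons]
      split <;> simp [ih] <;> (rw [List.filter_cons]; split <;> simp_all)

theorem pv_foldlA (lines : List (List Char)) :
    lines.foldl (fun acc line =>
        if pvIsHeader (PySem.Chars.strip line) then acc else acc ++ [line]) [] =
      lines.filter (fun l => !pvIsHeader (PySem.Chars.strip l)) := by
  rw [show (fun (acc : List (List Char)) line =>
        if pvIsHeader (PySem.Chars.strip line) then acc else acc ++ [line]) =
      (fun acc line => if !pvIsHeader (PySem.Chars.strip line) then acc ++ [id line] else acc) from by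
    funext acc line; cases h : pvIsHeader (PySem.Chars.strip line) <;> simp]
  rw [PySem.List.foldl_append_if]
  simp

theorem pvA_eq (text : String) (h : ¬ text.toList = []) :
    cleanup_summary_text text =
      String.ofList (PySem.Chars.join ['\n']
        (pvK (PySem.Chars.splitlines (PySem.Chars.replace text.toList ['*', '*'] [])))) := by
  simp only [cleanup_summary_text, if_neg h]
  congr 1
  have hbf : ∀ l ∈ PySem.Chars.splitlines (PySem.Chars.replace text.toList ['*', '*'] []),
      ∀ c ∈ l, pvIsB c = false := by
    rw [pv_splitlines_eq]
    exact pv_go_break_free pvIsB _ [] [] (by simp) (by simp)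
  rw [pv_foldlA,
    pv_splitlines_eq (PySem.Chars.join ['\n'] _),
    pv_go_join pvIsB (by decide) (by decide) _ []
      (fun l hl => hbf l (List.mem_of_mem_filter hl))]
  simp only [List.reverse_nil, List.nil_append]
  rw [pv_filter_strip_dropT, List.filter_map, List.filter_filter]
  simp only [pvK]
  congr 1

theorem pv_main (text : String) : cleanup_summary_text text = cleanup_summary_text_alt text := by
  by_cases h : text.toList = []
  · simp [cleanup_summary_text, cleanup_summary_text_alt, h]
  · rw [pvA_eq text h]
    simp only [cleanup_summary_text_alt, if_neg h]
    rw [pv_alt_inv text.toList [] [], pv_replace_eq, pv_splitlines_eq]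
    simp


-- ===== VERDICT (by name: the statement is the Claim_ definition above) =====
theorem cleanup_summary_text_spec : Claim_equal_cleanup_summary_text := by
  intro text _
  unfold Spec_cleanup_summary_text
  exact pv_main text
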